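-- pv_equiv track=rewrite | github.com/BenjaminHor/AdventOfCode | 2022/07/main.py | list_files
-- ===== SOURCE A (Python) =====
-- def list_files(pointer, lines, dir_stack, dir_size):
--     pointer += 1
--     while pointer < len(lines):
--         split = lines[pointer].split(" ")
--         if split[0] == "$":
--             pointer -= 1
--             break
--
--         if split[0] != "dir":
--             curr_dir = dir_stack[-1]
--             dir_size[curr_dir] += int(split[0])
--         pointer += 1
--
--     return pointer
-- ===== SOURCE B (Python) =====
-- # Two-pass rewrite: find the boundary of the file block first, then aggregate
-- # sizes in one separate pass (single dict update instead of one per file line).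
-- # Like A, it mutates dir_size in place (same final contents); equivalence is
-- # about the return value.
-- def list_files(pointer, lines, dir_stack, dir_size):
--     n = len(lines)
--     end = pointer + 1
--     while end < n and lines[end].split(" ")[0] != "$":
--         end += 1
--     sizes = [int(tok) for tok in (lines[i].split(" ")[0] for i in range(pointer + 1, end)) if tok != "dir"]
--     if sizes:
--         dir_size[dir_stack[-1]] += sum(sizes)
--     return end - 1 if end < n else end
-- ===== Notes on version B (the rewrite author's own statement) =====
-- stated objective: alternative
-- what changed: A interleaves boundary detection with per-line dict updates in one while-loop; B first finds the end of the file block, then aggregates all sizes in a separate pass and performs a single dict update, returning end-1 or end by a final boundary test.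
import Mathlib
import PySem

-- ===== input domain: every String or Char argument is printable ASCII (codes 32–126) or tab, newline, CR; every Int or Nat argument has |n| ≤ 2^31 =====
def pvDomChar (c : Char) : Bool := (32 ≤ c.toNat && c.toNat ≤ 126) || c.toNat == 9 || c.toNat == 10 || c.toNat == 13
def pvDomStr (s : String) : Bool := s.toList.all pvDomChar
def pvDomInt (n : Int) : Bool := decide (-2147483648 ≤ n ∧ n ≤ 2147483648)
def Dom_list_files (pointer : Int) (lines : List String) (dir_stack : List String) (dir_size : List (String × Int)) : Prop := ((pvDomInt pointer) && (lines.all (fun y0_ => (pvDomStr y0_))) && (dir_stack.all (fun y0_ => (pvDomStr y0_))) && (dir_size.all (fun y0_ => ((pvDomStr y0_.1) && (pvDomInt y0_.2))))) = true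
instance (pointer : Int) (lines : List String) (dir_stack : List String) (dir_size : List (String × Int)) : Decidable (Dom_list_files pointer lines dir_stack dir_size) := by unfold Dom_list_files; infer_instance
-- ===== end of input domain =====

-- B separates the two jobs A's while-loop interleaves: first find the end of the file
-- block, then aggregate all file sizes with ONE dict update (objective: alternative
-- decomposition). Both Pythons mutate dir_size in place identically; the equivalence
-- proved here is about the RETURN value.

-- line.split(" ")[0], shared by both ports and Pre_ (both Pythons write exactly this)
def first_token (line : String) : String :=
  ((PySem.Str.split? line " ").getD []).headD ""

-- ===== PORT A =====
-- A's while-loop as fuelled recursion over (pointer, dir_size); fuel only makes the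
-- same iteration total.  The `none` fallthrough branches are the places where the
-- Python raises (IndexError / KeyError / ValueError); Pre_ excludes those inputs.
def list_files_loop (lines dir_stack : List String) :
    Nat → Int → PySem.Dict String Int → Int
  | 0, pointer, _ => pointer
  | fuel+1, pointer, dsz =>
    if pointer < (lines.length : Int) then
      match PySem.List.pyGet? lines pointer with
      | none => pointer  -- lines[pointer]: IndexError, outside Pre_
      | some line =>
        if first_token line = "$" then
          pointer - 1
        else
          let dsz' :=
            if first_token line ≠ "dir" then
              match PySem.List.pyGet? dir_stack (-1) with
              | none => dsz  -- dir_stack[-1]: IndexError, outside Pre_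
              | some curr =>
                match PySem.Dict.get? dsz curr, PySem.Int.ofStr? (first_token line) with
                | some v, some k => PySem.Dict.insert dsz curr (v + k)
                | _, _ => dsz  -- KeyError / ValueError, outside Pre_
            else dsz
          list_files_loop lines dir_stack fuel (pointer + 1) dsz'
    else pointer

def list_files (pointer : Int) (lines : List String) (dir_stack : List String) (dir_size : List (String × Int)) : Int :=
  list_files_loop lines dir_stack ((lines.length - (pointer + 1)).toNat) (pointer + 1)
    (PySem.Dict.ofList dir_size)

-- ===== PORT B =====
-- pass 1 of Source B: scan forward for the first line whose first token is "$"
def find_end (lines : List String) : Nat → Int → Int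
  | 0, i => i
  | fuel+1, i =>
    if i < (lines.length : Int) then
      match PySem.List.pyGet? lines i with
      | none => i  -- lines[end]: IndexError, outside Pre_
      | some line =>
        if first_token line = "$" then i
        else find_end lines fuel (i + 1)
    else i

def list_files_alt (pointer : Int) (lines : List String) (dir_stack : List String) (dir_size : List (String × Int)) : Int :=
  let n : Int := lines.length
  let e := find_end lines ((lines.length - (pointer + 1)).toNat) (pointer + 1)
  -- pass 2 of Source B: the sizes of the non-"dir" file lines of the block
  -- (an unparsable token is a ValueError in Python, outside Pre_)
  let sizes := (PySem.List.pyRange (pointer + 1) e 1).filterMap (fun i =>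
      match PySem.List.pyGet? lines i with
      | some line =>
        if first_token line ≠ "dir" then PySem.Int.ofStr? (first_token line) else none
      | none => none)
  -- Source B's single in-place dict update; it mutates the dir_size argument and does not
  -- reach the return value
  let _dsz :=
    if sizes ≠ [] then
      match PySem.List.pyGet? dir_stack (-1) with
      | some curr =>
        match PySem.Dict.get? (PySem.Dict.ofList dir_size) curr with
        | some v => PySem.Dict.insert (PySem.Dict.ofList dir_size) curr (v + sizes.sum)
        | none => PySem.Dict.ofList dir_size
      | none => PySem.Dict.ofList dir_size
    else PySem.Dict.ofList dir_size
  if e < n then e - 1 else e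

-- ===== PRECONDITION & SPEC =====
-- the lines A's loop visits before stopping: from index pointer+1 (Python's negative
-- indices wrap, visiting a tail of the list and then the whole list) up to the first
-- line whose first token is "$"
def scanned_lines (pointer : Int) (lines : List String) : List String :=
  let s := pointer + 1
  let tail := if s < 0 then lines.drop ((lines.length : Int) + s).toNat ++ lines
              else lines.drop s.toNat
  tail.takeWhile (fun l => first_token l != "$")

-- Pre_ = exactly the inputs where the Python A returns: the first visited index is not
-- below -len(lines) (IndexError), and every visited non-"dir" file line has an
-- int-parsable first token (ValueError), a nonempty dir_stack (IndexError) and its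
-- current directory present in dir_size (KeyError).
def Pre_list_files (pointer : Int) (lines : List String) (dir_stack : List String) (dir_size : List (String × Int)) : Prop :=
  -(lines.length : Int) ≤ pointer + 1 ∧
  ∀ l ∈ scanned_lines pointer lines,
    first_token l ≠ "dir" →
      (PySem.Int.ofStr? (first_token l)).isSome ∧
      dir_stack ≠ [] ∧
      ((PySem.Dict.ofList dir_size).get? (dir_stack.getLastD "")).isSome

instance (pointer : Int) (lines : List String) (dir_stack : List String) (dir_size : List (String × Int)) : Decidable (Pre_list_files pointer lines dir_stack dir_size) := by
  unfold Pre_list_files; infer_instance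

def pvWitness_list_files : Int × List String × List String × (List (String × Int)) :=
  (0, ["$ ls", "dir a", "3 b.txt", "$ cd .."], ["/"], [("/", 0)])

def Spec_list_files (pointer : Int) (lines : List String) (dir_stack : List String) (dir_size : List (String × Int)) (out : Int) : Prop := out = list_files_alt pointer lines dir_stack dir_size
instance (pointer : Int) (lines : List String) (dir_stack : List String) (dir_size : List (String × Int)) (out : Int) : Decidable (Spec_list_files pointer lines dir_stack dir_size out) := by unfold Spec_list_files; infer_instance

-- ===== CLAIM (what is proved, stated in full; the proofs are below) =====
def Claim_equal_list_files : Prop := ∀ (pointer : Int) (lines : List String) (dir_stack : List String) (dir_size : List (String × Int)), Dom_list_files pointer lines dir_stack dir_size → Pre_list_files pointer lines dir_stack dir_size → Spec_list_files pointer lines dir_stack dir_size (list_files pointer lines dir_stack dir_size)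

-- ===== LEMMAS AND PROOFS =====

-- A's loop computes B's "find the end, then adjust" value, for any dict state and any
-- sufficient fuel, as long as the start index is not below -len(lines).
theorem loop_eq_find_end (lines dir_stack : List String) :
    ∀ (fuel : Nat) (i : Int) (dsz : PySem.Dict String Int),
      (lines.length : Int) ≤ i + fuel → -(lines.length : Int) ≤ i →
      list_files_loop lines dir_stack fuel i dsz =
        (if find_end lines fuel i < (lines.length : Int) then find_end lines fuel i - 1
         else find_end lines fuel i) := by
  intro fuel
  induction fuel with
  | zero =>
    intro i dsz hfuel _
    simp only [list_files_loop, find_end]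
    have : ¬ i < (lines.length : Int) := by omega
    simp [this]
  | succ fuel ih =>
    intro i dsz hfuel hlo
    by_cases h : i < (lines.length : Int)
    · cases hline : PySem.List.pyGet? lines i with
      | none =>
        rw [PySem.List.pyGet?_eq_none_iff] at hline
        simp [PySem.Raise.InRange] at hline
        omega
      | some line =>
        by_cases hdollar : first_token line = "$"
        · simp [list_files_loop, find_end, h, hline, hdollar]
        · simp only [list_files_loop, find_end, h, if_true, hline, hdollar, if_false]
          exact ih (i + 1) _ (by omega) (by omega)
    · simp [list_files_loop, find_end, h]

theorem list_files_spec : Claim_equal_list_files := by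
  intro pointer lines dir_stack dir_size _ hpre
  unfold Spec_list_files list_files list_files_alt
  simp only []
  rw [loop_eq_find_end lines dir_stack _ _ _ (by omega) hpre.1]
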